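-- pv_equiv track=rewrite | github.com/bfxh/ai-platform | MCP_3D/Godot/godot-bridge-mcp/mcp-server/src/security.py | validate_node_name
-- ===== SOURCE A (Python) =====
-- def validate_node_name(name: str) -> bool:
--     """Validate a node name."""
--     if not name:
--         return False
--     invalid_chars = ['.', ':', '/', '@', '%']
--     for c in invalid_chars:
--         if c in name:
--             return False
--     return True
-- ===== SOURCE B (Python) =====
-- def validate_node_name(name: str) -> bool:
--     """Validate a node name."""
--     invalid = {'.', ':', '/', '@', '%'}
--     return bool(name) and not any(c in invalid for c in name)
-- ===== Notes on version B (the rewrite author's own statement) =====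
-- stated objective: idiomatic
-- what changed: B scans the characters of name once against a precomputed forbidden set instead of running a substring search over name for each of the five forbidden characters.
import Mathlib
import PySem

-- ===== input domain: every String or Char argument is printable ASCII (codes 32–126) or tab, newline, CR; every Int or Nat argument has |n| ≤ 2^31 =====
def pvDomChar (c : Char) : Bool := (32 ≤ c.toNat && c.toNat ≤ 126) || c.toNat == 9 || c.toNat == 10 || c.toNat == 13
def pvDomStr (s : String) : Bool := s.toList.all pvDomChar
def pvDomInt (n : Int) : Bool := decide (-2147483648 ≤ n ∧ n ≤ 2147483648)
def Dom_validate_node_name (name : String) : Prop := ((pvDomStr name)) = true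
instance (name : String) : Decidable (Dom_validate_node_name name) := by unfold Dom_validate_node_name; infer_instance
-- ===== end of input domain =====

-- B scans name's characters once against a set of forbidden characters instead of
-- substring-searching name for each of the five forbidden characters (idiomatic).
-- ===== PORT A =====
-- literal port of A: empty guard, then loop over the fixed invalid-char list,
-- returning false as soon as one is a substring of name
def validate_node_name_loop (name : String) : List String → Bool
  | [] => true
  | c :: rest => if PySem.Str.isIn c name then false else validate_node_name_loop name rest

def validate_node_name (name : String) : Bool :=
  if name = "" then false
  else validate_node_name_loop name [".", ":", "/", "@", "%"]

-- ===== PORT B =====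
-- literal port of B: bool(name) and not any(c in invalid for c in name)
def validate_node_name_alt (name : String) : Bool :=
  decide (name ≠ "") && !(name.toList.any (fun c => ['.', ':', '/', '@', '%'].contains c))

-- ===== PRECONDITION & SPEC =====
def Spec_validate_node_name (name : String) (out : Bool) : Prop := out = validate_node_name_alt name
instance (name : String) (out : Bool) : Decidable (Spec_validate_node_name name out) := by unfold Spec_validate_node_name; infer_instance

-- ===== CLAIM (what is proved, stated in full; the proofs are below) =====
def Claim_equal_validate_node_name : Prop := ∀ (name : String), Dom_validate_node_name name → Spec_validate_node_name name (validate_node_name name)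

-- ===== LEMMAS AND PROOFS =====

-- ===== VERDICT (by name: the statement is the Claim_ definition above) =====
-- A's loop over the five one-character strings returns true iff none of the five
-- characters occurs in name; B's any over name's characters decides the same thing.
theorem loop_eq (name : String) :
    validate_node_name_loop name [".", ":", "/", "@", "%"] =
      !(name.toList.any (fun c => ['.', ':', '/', '@', '%'].contains c)) := by
  have h : ∀ c : Char, PySem.Str.isIn (String.ofList [c]) name = name.toList.contains c := by
    intro c
    have hl : (String.ofList [c]).toList = [c] := by simp
    rcases hb : name.toList.contains c with _ | _
    · rw [Bool.eq_false_iff]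
      intro hcon
      have := (PySem.Str.isIn_iff_infix _ _).mp hcon
      rw [hl, List.singleton_infix_iff] at this
      simp_all
    · exact (PySem.Str.isIn_iff_infix _ _).mpr
        (by rw [hl, List.singleton_infix_iff]; simp_all)
  have hd : ("." : String) = String.ofList ['.'] := rfl
  have hc : (":" : String) = String.ofList [':'] := rfl
  have hs : ("/" : String) = String.ofList ['/'] := rfl
  have ha : ("@" : String) = String.ofList ['@'] := rfl
  have hp : ("%" : String) = String.ofList ['%'] := rfl
  simp only [validate_node_name_loop, hd, hc, hs, ha, hp, h]
  by_cases h1 : '.' ∈ name.toList <;> by_cases h2 : ':' ∈ name.toList <;>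
    by_cases h3 : '/' ∈ name.toList <;> by_cases h4 : '@' ∈ name.toList <;>
    by_cases h5 : '%' ∈ name.toList <;> simp_all <;>
    first
      | exact ⟨'.', h1, Or.inl rfl⟩
      | exact ⟨':', h2, Or.inr (Or.inl rfl)⟩
      | exact ⟨'/', h3, Or.inr (Or.inr (Or.inl rfl))⟩
      | exact ⟨'@', h4, Or.inr (Or.inr (Or.inr (Or.inl rfl)))⟩
      | exact ⟨'%', h5, Or.inr (Or.inr (Or.inr (Or.inr rfl)))⟩
      | (intro x hx; refine ⟨?_, ?_, ?_, ?_, ?_⟩ <;> rintro rfl <;> contradiction)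

theorem validate_node_name_spec : Claim_equal_validate_node_name := by
  intro name _
  unfold Spec_validate_node_name validate_node_name validate_node_name_alt
  by_cases h : name = "" <;> simp [h, loop_eq]
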